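-- pv_equiv track=rewrite | github.com/jriyyya/nillion-python-starter | quickstart/nada_quickstart_programs/src/main.py | match_loans
-- ===== SOURCE A (Python) =====
-- def match_loans(loan_requests, loan_offers):
--     matches = []
--     for loan_amount, max_interest_rate in loan_requests:
--         best_offer = None
--         for offer_amount, interest_rate in loan_offers:
--             if interest_rate <= max_interest_rate and (best_offer is None or interest_rate < best_offer[1]):
--                 best_offer = (offer_amount, interest_rate)
--         if best_offer:
--             matches.append((loan_amount, best_offer[0], best_offer[1]))
--     return matches
-- ===== SOURCE B (Python) =====
-- def match_loans(loan_requests, loan_offers):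
--     # Precompute the single lowest-rate offer (first occurrence) once: O(R + O).
--     best = None
--     for offer_amount, interest_rate in loan_offers:
--         if best is None or interest_rate < best[1]:
--             best = (offer_amount, interest_rate)
--     if best is None:
--         return []
--     best_amount, best_rate = best
--     return [(loan_amount, best_amount, best_rate)
--             for loan_amount, max_interest_rate in loan_requests
--             if best_rate <= max_interest_rate]
-- ===== Notes on version B (the rewrite author's own statement) =====
-- stated objective: faster
-- what changed: Instead of rescanning all offers for every request, B computes the global minimum-rate offer (first occurrence) once and answers each request with an O(1) rate<=max check, since the per-request best offer is always that global minimum when it qualifies.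
import Mathlib
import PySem

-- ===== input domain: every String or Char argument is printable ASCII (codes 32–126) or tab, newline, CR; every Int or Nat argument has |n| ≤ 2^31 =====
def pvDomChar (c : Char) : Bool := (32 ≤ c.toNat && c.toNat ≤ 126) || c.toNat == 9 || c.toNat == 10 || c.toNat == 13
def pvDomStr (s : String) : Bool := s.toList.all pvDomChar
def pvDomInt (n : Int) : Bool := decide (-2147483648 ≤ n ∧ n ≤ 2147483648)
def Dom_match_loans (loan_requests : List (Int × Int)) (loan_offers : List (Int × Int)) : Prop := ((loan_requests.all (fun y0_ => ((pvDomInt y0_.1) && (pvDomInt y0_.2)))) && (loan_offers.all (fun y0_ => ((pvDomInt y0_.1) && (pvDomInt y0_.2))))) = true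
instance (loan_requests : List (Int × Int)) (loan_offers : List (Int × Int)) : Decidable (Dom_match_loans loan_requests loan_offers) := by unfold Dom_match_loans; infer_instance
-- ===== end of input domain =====

-- B replaces the per-request scan of all offers by one precomputed global minimum-rate offer (faster).
-- ===== PORT A =====
-- inner loop of A: best qualifying offer so far (rate <= m, first strict minimum)
def mlAStep (m : Int) (b : Option (Int × Int)) (o : Int × Int) : Option (Int × Int) :=
  match b with
  | none => if o.2 ≤ m then some o else b
  | some bb => if o.2 ≤ m ∧ o.2 < bb.2 then some o else b

def match_loans (loan_requests : List (Int × Int)) (loan_offers : List (Int × Int)) : List (Int × Int × Int) :=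
  loan_requests.foldl (fun ms r =>
    let best_offer := loan_offers.foldl (mlAStep r.2) none
    match best_offer with
    | some bb => ms ++ [(r.1, bb.1, bb.2)]
    | none => ms) []

-- ===== PORT B =====
-- B's first loop: global minimum-rate offer (first occurrence)
def mlBStep (b : Option (Int × Int)) (o : Int × Int) : Option (Int × Int) :=
  match b with
  | none => some o
  | some bb => if o.2 < bb.2 then some o else b

def match_loans_alt (loan_requests : List (Int × Int)) (loan_offers : List (Int × Int)) : List (Int × Int × Int) :=
  match loan_offers.foldl mlBStep none with
  | none => []
  | some best => (loan_requests.filter (fun r => decide (best.2 ≤ r.2))).map (fun r => (r.1, best.1, best.2))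

-- ===== PRECONDITION & SPEC =====
def Spec_match_loans (loan_requests : List (Int × Int)) (loan_offers : List (Int × Int)) (out : List (Int × Int × Int)) : Prop := out = match_loans_alt loan_requests loan_offers
instance (loan_requests : List (Int × Int)) (loan_offers : List (Int × Int)) (out : List (Int × Int × Int)) : Decidable (Spec_match_loans loan_requests loan_offers out) := by unfold Spec_match_loans; infer_instance

-- ===== CLAIM (what is proved, stated in full; the proofs are below) =====
def Claim_equal_match_loans : Prop := ∀ (loan_requests : List (Int × Int)) (loan_offers : List (Int × Int)), Dom_match_loans loan_requests loan_offers → Spec_match_loans loan_requests loan_offers (match_loans loan_requests loan_offers)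

-- ===== LEMMAS AND PROOFS =====

-- ===== VERDICT (by name: the statement is the Claim_ definition above) =====
-- restriction of a running best to rates ≤ m
def mlRestrict (m : Int) (b : Option (Int × Int)) : Option (Int × Int) :=
  match b with
  | none => none
  | some bb => if bb.2 ≤ m then some bb else none

theorem mlInner_eq (m : Int) (offers : List (Int × Int)) :
    ∀ b : Option (Int × Int),
      offers.foldl (mlAStep m) (mlRestrict m b) = mlRestrict m (offers.foldl mlBStep b) := by
  induction offers with
  | nil => intro b; rfl
  | cons o os ih =>
    intro b
    have hstep : mlAStep m (mlRestrict m b) o = mlRestrict m (mlBStep b o) := by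
      cases b with
      | none => simp [mlAStep, mlBStep, mlRestrict]
      | some bb =>
        by_cases h1 : bb.2 ≤ m <;> by_cases h2 : o.2 < bb.2 <;> by_cases h3 : o.2 ≤ m <;>
          simp [mlAStep, mlBStep, mlRestrict, h1, h2, h3] <;> omega
    simpa [List.foldl_cons, hstep] using ih (mlBStep b o)

theorem mlOuter (offers : List (Int × Int)) (reqs : List (Int × Int)) :
    ∀ acc : List (Int × Int × Int),
      reqs.foldl (fun ms r =>
        let best_offer := offers.foldl (mlAStep r.2) none
        match best_offer with
        | some bb => ms ++ [(r.1, bb.1, bb.2)]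
        | none => ms) acc
      = acc ++ match_loans_alt reqs offers := by
  induction reqs with
  | nil => intro acc; simp [match_loans_alt]; cases offers.foldl mlBStep none <;> rfl
  | cons r rs ih =>
    intro acc
    have hinner : offers.foldl (mlAStep r.2) none = mlRestrict r.2 (offers.foldl mlBStep none) :=
      mlInner_eq r.2 offers none
    simp only [List.foldl_cons, hinner]
    rw [ih]
    cases hb : offers.foldl mlBStep none with
    | none => simp [mlRestrict, match_loans_alt, hb]
    | some best =>
      by_cases h : best.2 ≤ r.2 <;>
        simp [mlRestrict, match_loans_alt, hb, h]

-- ===== VERDICT =====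
theorem match_loans_spec : Claim_equal_match_loans := by
  intro reqs offers _
  unfold Spec_match_loans match_loans
  simpa using mlOuter offers reqs []
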